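-- pv_equiv track=rewrite | github.com/mholeys/roadtrip-choroq-tools | car-model.py | createFaceList
-- ===== SOURCE A (Python) =====
-- def createFaceList(vertexCount, faceType=1):
--     # Creates a list of indices that order how to draw the
--     # verticies in order of how to render the triangles
--     faces = []
--
--     if (faceType == 1):
--         startDirection = 1
--         x = 0
--         a = 0
--         b = 0
--
--         f1 = a + 1
--         f2 = b + 1
--         faceDirection = startDirection
--         while (x < vertexCount):
--             x += 1
--
--             f3 = x
--             faceDirection *= -1
--             if (f1 != f2) and (f2 != f3) and (f3 != f1):
--                 if (faceDirection > 0):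
--                     faces.append((f1, f2, f3))
--                 else:
--                     faces.append((f1, f3, f2))
--             f1 = f2
--             f2 = f3
--     if (faceType == 0):
--         a = 0
--         b = 0
--         c = 0
--
--         for x in range(0, vertexCount, 3):
--             a = x
--             b = x+1
--             c = x+2
--             faces.append((a, b, c))
--     return faces
-- ===== SOURCE B (Python) =====
-- def createFaceList(vertexCount, faceType=1):
--     if faceType == 1:
--         # stage 1: all sliding windows of the vertex indices, via zip of shifted ranges
--         r = range(1, vertexCount + 1)
--         tris = list(zip(r, r[1:], r[2:]))
--         # stage 2: flip the winding of every other triangle by stride-2 slice assignment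
--         tris[0::2] = [(a, c, b) for (a, b, c) in tris[0::2]]
--         return tris
--     if faceType == 0:
--         # one triangle per group of three, counted in closed form
--         return [(3 * k, 3 * k + 1, 3 * k + 2) for k in range((vertexCount + 2) // 3)]
--     return []
-- ===== Notes on version B (the rewrite author's own statement) =====
-- stated objective: alternative
-- what changed: Replaces A's stateful while loop (sliding f1/f2 window, flipping faceDirection, degenerate-triple skip) by two stages: zip of three shifted ranges to build all windows, then a stride-2 slice assignment to flip alternate windings; the faceType==0 branch maps a closed-form triangle count instead of stepping a range by 3.
import Mathlib
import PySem

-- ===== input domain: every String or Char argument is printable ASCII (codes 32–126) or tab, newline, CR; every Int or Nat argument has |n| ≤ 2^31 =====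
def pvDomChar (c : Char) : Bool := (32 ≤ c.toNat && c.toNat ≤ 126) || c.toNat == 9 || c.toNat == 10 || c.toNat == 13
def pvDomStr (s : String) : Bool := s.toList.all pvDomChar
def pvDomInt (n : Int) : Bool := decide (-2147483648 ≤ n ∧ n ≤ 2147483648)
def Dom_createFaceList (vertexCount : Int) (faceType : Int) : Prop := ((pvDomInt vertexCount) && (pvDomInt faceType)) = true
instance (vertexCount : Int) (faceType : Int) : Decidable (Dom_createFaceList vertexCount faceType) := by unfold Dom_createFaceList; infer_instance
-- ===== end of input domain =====

-- B builds the triangle strip in two stages (zip of shifted ranges, then flipping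
-- alternate windings) instead of A's stateful sliding-window loop (objective: alternative).

-- ===== PORT A =====
-- the while loop of the faceType == 1 branch, state: x, f1, f2, faceDirection, faces
def createFaceListLoopA (vertexCount : Int) (x f1 f2 faceDirection : Int)
    (faces : List (Int × Int × Int)) : List (Int × Int × Int) :=
  if h : x < vertexCount then
    let x' := x + 1
    let f3 := x'
    let faceDirection' := faceDirection * (-1)
    let faces' :=
      if f1 ≠ f2 ∧ f2 ≠ f3 ∧ f3 ≠ f1 then
        if faceDirection' > 0 then faces ++ [(f1, f2, f3)] else faces ++ [(f1, f3, f2)]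
      else faces
    createFaceListLoopA vertexCount x' f2 f3 faceDirection' faces'
  else faces
termination_by (vertexCount - x).toNat
decreasing_by omega

def createFaceList (vertexCount : Int) (faceType : Int) : List (Int × Int × Int) :=
  let faces : List (Int × Int × Int) := []
  let faces :=
    if faceType == 1 then
      -- startDirection = 1, x = 0, a = 0, b = 0, f1 = a+1, f2 = b+1, faceDirection = startDirection
      createFaceListLoopA vertexCount 0 1 1 1 faces
    else faces
  let faces :=
    if faceType == 0 then
      (PySem.List.pyRange 0 vertexCount 3).foldl
        (fun acc x => acc ++ [(x, x + 1, x + 2)]) faces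
    else faces
  faces

-- ===== PORT B =====
-- swap the winding of one triangle: (a, b, c) -> (a, c, b)
def pvSwapPair (t : Int × Int × Int) : Int × Int × Int := (t.1, t.2.2, t.2.1)

-- hand port of Python's ternary zip (truncates to the shortest list; exact)
def pvZip3 : List Int → List Int → List Int → List (Int × Int × Int)
  | a :: as, b :: bs, c :: cs => (a, b, c) :: pvZip3 as bs cs
  | _, _, _ => []

-- hand port of the stride-2 slice assignment tris[0::2] = [swapped …]: replace every
-- second element, starting with the first, by its swapped form (exact: same elements,
-- same positions)
def pvSwapAlt : List (Int × Int × Int) → List (Int × Int × Int)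
  | [] => []
  | [t] => [pvSwapPair t]
  | t :: u :: rest => pvSwapPair t :: u :: pvSwapAlt rest

def createFaceList_alt (vertexCount : Int) (faceType : Int) : List (Int × Int × Int) :=
  if faceType == 1 then
    let r := PySem.List.pyRange 1 (vertexCount + 1) 1
    -- r[1:], r[2:] are tail slices with nonnegative start = drop (exact here)
    pvSwapAlt (pvZip3 r (r.drop 1) (r.drop 2))
  else if faceType == 0 then
    (PySem.List.pyRange 0 (PySem.Int.floordiv (vertexCount + 2) 3) 1).map
      (fun k => (3 * k, 3 * k + 1, 3 * k + 2))
  else []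

-- ===== PRECONDITION & SPEC =====
def Spec_createFaceList (vertexCount : Int) (faceType : Int) (out : List (Int × Int × Int)) : Prop := out = createFaceList_alt vertexCount faceType
instance (vertexCount : Int) (faceType : Int) (out : List (Int × Int × Int)) : Decidable (Spec_createFaceList vertexCount faceType out) := by unfold Spec_createFaceList; infer_instance

-- ===== CLAIM (what is proved, stated in full; the proofs are below) =====
def Claim_equal_createFaceList : Prop := ∀ (vertexCount : Int) (faceType : Int), Dom_createFaceList vertexCount faceType → Spec_createFaceList vertexCount faceType (createFaceList vertexCount faceType)

-- ===== LEMMAS AND PROOFS =====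

-- the triangle whose last vertex index is i, with A's winding rule
def pvTri (i : Int) : Int × Int × Int :=
  if i % 2 = 1 then (i - 2, i, i - 1) else (i - 2, i - 1, i)

-- ---- A side: the loop produces map pvTri over the indices 3 .. vertexCount ----

-- invariant of A's while loop from x ≥ 2 onwards: window is (x-1, x), direction is the parity of x
theorem createFaceListLoopA_inv (V : Int) (x : Int) (hx : 2 ≤ x) (d : Int)
    (hd : d = if x % 2 = 0 then 1 else -1) (faces : List (Int × Int × Int)) :
    createFaceListLoopA V x (x - 1) x d faces
      = faces ++ (PySem.List.pyRange (x + 1) (V + 1) 1).map pvTri := by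
  by_cases h : x < V
  · rw [createFaceListLoopA]
    have h3 : x + 1 ≠ x - 1 := by omega
    have hrange : PySem.List.pyRange (x + 1) (V + 1) 1
        = (x + 1) :: PySem.List.pyRange (x + 1 + 1) (V + 1) 1 :=
      PySem.List.pyRange_one_cons (a := x + 1) (b := V + 1) (by omega)
    rcases Int.emod_two_eq x with hp | hp
    · have hd' : d * -1 = -1 := by rw [hd, if_pos hp]; ring
      have hrec := createFaceListLoopA_inv V (x + 1) (by omega) (d * -1)
        (by rw [hd']; rw [if_neg (by omega)]) (faces ++ [(x - 1, x + 1, x)])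
      rw [show x + 1 - 1 = x from by ring, hd'] at hrec
      simp only [dif_pos h, hd']
      norm_num [h3]
      rw [hrec, hrange]
      simp [pvTri, show (x + 1) % 2 = 1 from by omega]
      all_goals omega
    · have hd' : d * -1 = 1 := by rw [hd, if_neg (by omega)]; ring
      have hrec := createFaceListLoopA_inv V (x + 1) (by omega) (d * -1)
        (by rw [hd']; rw [if_pos (by omega)]) (faces ++ [(x - 1, x, x + 1)])
      rw [show x + 1 - 1 = x from by ring, hd'] at hrec
      simp only [dif_pos h, hd']
      norm_num [h3]
      rw [hrec, hrange]
      simp [pvTri, show (x + 1) % 2 ≠ 1 from by omega]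
      all_goals omega
  · rw [createFaceListLoopA]
    simp only [h, dif_neg, not_false_iff]
    rw [PySem.List.pyRange_one_eq_nil (by omega)]
    simp
termination_by (V - x).toNat
decreasing_by all_goals (simp_wf; omega)

-- the first two iterations of A's loop (x = 0, 1) append nothing: the window is degenerate
theorem createFaceListLoopA_start (V : Int) :
    createFaceListLoopA V 0 1 1 1 [] = (PySem.List.pyRange 3 (V + 1) 1).map pvTri := by
  by_cases h0 : 0 < V
  · rw [createFaceListLoopA]
    simp only [h0, dif_pos]
    norm_num
    by_cases h1 : 1 < V
    · rw [createFaceListLoopA]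
      simp only [h1, dif_pos]
      norm_num
      have := createFaceListLoopA_inv V 2 (by omega) 1 (by norm_num) []
      norm_num at this
      convert this using 2
    · rw [createFaceListLoopA]
      simp only [h1, dif_neg, not_false_iff]
      rw [PySem.List.pyRange_one_eq_nil (by omega)]
      simp
  · rw [createFaceListLoopA]
    simp only [h0, dif_neg, not_false_iff]
    rw [PySem.List.pyRange_one_eq_nil (by omega)]
    simp

-- A's faceType == 0 foldl as a map
theorem foldl_append_map (l : List Int) (acc : List (Int × Int × Int)) :
    l.foldl (fun acc x => acc ++ [(x, x + 1, x + 2)]) acc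
      = acc ++ l.map (fun x => (x, x + 1, x + 2)) := by
  induction l generalizing acc with
  | nil => simp
  | cons a t ih => simp [List.foldl, ih]

-- ---- B side: the zip-then-flip stages also produce map pvTri ----

theorem drop_one_pyRange (a b : Int) :
    (PySem.List.pyRange a b 1).drop 1 = PySem.List.pyRange (a + 1) b 1 := by
  rcases lt_or_ge a b with h | h
  · rw [PySem.List.pyRange_one_cons h]; rfl
  · rw [PySem.List.pyRange_one_eq_nil h, PySem.List.pyRange_one_eq_nil (by omega)]; rfl

theorem drop_two_pyRange (a b : Int) :
    (PySem.List.pyRange a b 1).drop 2 = PySem.List.pyRange (a + 2) b 1 := by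
  have h : (PySem.List.pyRange a b 1).drop 2
      = ((PySem.List.pyRange a b 1).drop 1).drop 1 := by simp
  rw [h, drop_one_pyRange, drop_one_pyRange, show a + 1 + 1 = a + 2 from by ring]

theorem pvZip3_nil3 (l1 l2 : List Int) : pvZip3 l1 l2 [] = [] := by
  cases l1 <;> cases l2 <;> rfl

-- the windows: zip of the three shifted ranges = map of (x-2, x-1, x) over the last range
theorem pvZip3_ranges : ∀ (n : Nat) (a b : Int), (b - a).toNat ≤ n →
    pvZip3 (PySem.List.pyRange a b 1) (PySem.List.pyRange (a + 1) b 1)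
      (PySem.List.pyRange (a + 2) b 1)
      = (PySem.List.pyRange (a + 2) b 1).map (fun x => (x - 2, x - 1, x)) := by
  intro n
  induction n with
  | zero =>
    intro a b h
    rw [PySem.List.pyRange_one_eq_nil (show b ≤ a + 2 by omega)]
    simp [pvZip3_nil3]
  | succ n ih =>
    intro a b h
    by_cases h2 : a + 2 < b
    · have e3 : PySem.List.pyRange (a + 2) b 1 = (a + 2) :: PySem.List.pyRange (a + 3) b 1 := by
        rw [PySem.List.pyRange_one_cons h2, show a + 2 + 1 = a + 3 from by ring]
      have e2 : PySem.List.pyRange (a + 1) b 1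
          = (a + 1) :: (a + 2) :: PySem.List.pyRange (a + 3) b 1 := by
        rw [PySem.List.pyRange_one_cons (show a + 1 < b by omega)]
        rw [show a + 1 + 1 = a + 2 from by ring, e3]
      have e1 : PySem.List.pyRange a b 1
          = a :: (a + 1) :: (a + 2) :: PySem.List.pyRange (a + 3) b 1 := by
        rw [PySem.List.pyRange_one_cons (show a < b by omega), e2]
      have hrec := ih (a + 1) b (by omega)
      rw [show a + 1 + 1 = a + 2 from by ring, show a + 1 + 2 = a + 3 from by ring] at hrec
      rw [e2, e3] at hrec
      rw [e1, e2, e3]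
      simp only [pvZip3, List.map_cons]
      rw [hrec]
      simp only [List.cons.injEq, Prod.mk.injEq]
      refine ⟨⟨by ring, by ring, trivial⟩, trivial⟩
    · rw [PySem.List.pyRange_one_eq_nil (show b ≤ a + 2 by omega)]
      simp [pvZip3_nil3]

-- the winding-flip stage on the window list = map pvTri, for an odd first index
theorem pvSwapAlt_map_win : ∀ (n : Nat) (i b : Int), (b - i).toNat ≤ n → i % 2 = 1 →
    pvSwapAlt ((PySem.List.pyRange i b 1).map (fun x => (x - 2, x - 1, x)))
      = (PySem.List.pyRange i b 1).map pvTri := by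
  intro n
  induction n with
  | zero =>
    intro i b h _
    rw [PySem.List.pyRange_one_eq_nil (by omega)]
    rfl
  | succ n ih =>
    intro i b h hodd
    by_cases hi : i < b
    · rw [PySem.List.pyRange_one_cons hi]
      by_cases hi1 : i + 1 < b
      · rw [PySem.List.pyRange_one_cons hi1]
        simp only [List.map_cons, pvSwapAlt, List.cons.injEq]
        refine ⟨?_, ?_, ?_⟩
        · simp [pvTri, pvSwapPair, hodd]
        · simp only [pvTri, if_neg (show ¬ (i + 1) % 2 = 1 from by omega)]
        · exact ih (i + 1 + 1) b (by omega) (by omega)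
      · rw [PySem.List.pyRange_one_eq_nil (show b ≤ i + 1 by omega)]
        simp only [List.map_cons, List.map_nil, pvSwapAlt, List.cons.injEq]
        exact ⟨by simp [pvTri, pvSwapPair, hodd], trivial⟩
    · rw [PySem.List.pyRange_one_eq_nil (by omega)]
      rfl

-- ---- faceType == 0: closed-form count equals the step-3 range ----
theorem pyRange_three_eq (V : Int) :
    PySem.List.pyRange 0 V 3
      = (PySem.List.pyRange 0 (PySem.Int.floordiv (V + 2) 3) 1).map (fun k => 3 * k) := by
  rw [PySem.List.pyRange_of_pos 0 V (by norm_num), PySem.List.pyRange_one]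
  by_cases hV : 0 < V
  · rw [if_pos hV, PySem.Int.floordiv_eq_ediv_of_pos (by norm_num)]
    simp only [List.map_map]
    have hc : ((V - 0 + 3 - 1) / 3).toNat = ((V + 2) / 3 - 0).toNat := by omega
    rw [hc]
    congr 1
    funext k
    simp only [Function.comp]
    ring
  · rw [if_neg hV]
    have hT : PySem.Int.floordiv (V + 2) 3 ≤ 0 := by
      have h1 := PySem.Int.floordiv_mul_add_mod (V + 2) 3
      have h2 := PySem.Int.mod_nonneg (V + 2) (show (0:Int) < 3 by norm_num)
      have h3 := PySem.Int.mod_lt (V + 2) (show (0:Int) < 3 by norm_num)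
      omega
    rw [show (PySem.Int.floordiv (V + 2) 3 - 0).toNat = 0 from by omega]
    simp

-- ===== VERDICT (by name: the statement is the Claim_ definition above) =====
theorem createFaceList_spec : Claim_equal_createFaceList := by
  intro V ft _
  unfold Spec_createFaceList createFaceList createFaceList_alt
  by_cases h1 : ft = 1
  · subst h1
    simp only [show ((1 : Int) == 1) = true from rfl, if_true,
      show ((1 : Int) == 0) = false from rfl, Bool.false_eq_true, if_false]
    rw [createFaceListLoopA_start, drop_one_pyRange, drop_two_pyRange]
    rw [pvZip3_ranges (V + 1 - 1).toNat 1 (V + 1) (le_refl _)]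
    rw [show (1:Int) + 2 = 3 from by norm_num]
    rw [pvSwapAlt_map_win (V + 1 - 3).toNat 3 (V + 1) (le_refl _) (by norm_num)]
  · by_cases h0 : ft = 0
    · subst h0
      simp only [show ((0 : Int) == 1) = false from rfl,
        show ((0 : Int) == 0) = true from rfl, Bool.false_eq_true, if_false, if_true]
      rw [foldl_append_map, pyRange_three_eq]
      simp only [List.nil_append, List.map_map]
      rfl
    · simp [h1, h0, beq_iff_eq]
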